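-- pv_equiv track=rewrite | github.com/mvj3/HackerRank | Search/triple-sum.py | triplets_timeout
-- ===== SOURCE A (Python) =====
-- def triplets_timeout(a, b, c):
--     a1, b1, c1 = list(reversed(sorted(set(a)))), list(reversed(sorted(set(b)))), list(reversed(sorted(set(c))))
--     possibles = []
--     for n in b1:
--         midx = None
--         for midx1, m in enumerate(a1):
--             if m <= n:
--                 midx = midx1
--                 break
--         lidx = None
--         for lidx1, l in enumerate(c1):
--             if l <= n:
--                 lidx = lidx1
--                 break
--         if midx is not None and lidx is not None:
--             mcount = len(a1) - midx
--             lcount = len(c1) - lidx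
--             possibles.append(mcount * lcount)
--     return sum(possibles)
-- ===== SOURCE B (Python) =====
-- def triplets_timeout(a, b, c):
--     # Two-pointer merge over ascending unique lists: O((A+B+C) log) total.
--     ua = sorted(set(a))
--     uc = sorted(set(c))
--     i = j = 0
--     total = 0
--     for n in sorted(set(b)):
--         while i < len(ua) and ua[i] <= n:
--             i += 1
--         while j < len(uc) and uc[j] <= n:
--             j += 1
--         total += i * j
--     return total
-- ===== Notes on version B (the rewrite author's own statement) =====
-- stated objective: faster
-- what changed: Replaces A's per-b linear scans of the descending unique a/c lists by a single two-pointer merge over the ascending unique lists, so each pointer moves over each list only once.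
import Mathlib
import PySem

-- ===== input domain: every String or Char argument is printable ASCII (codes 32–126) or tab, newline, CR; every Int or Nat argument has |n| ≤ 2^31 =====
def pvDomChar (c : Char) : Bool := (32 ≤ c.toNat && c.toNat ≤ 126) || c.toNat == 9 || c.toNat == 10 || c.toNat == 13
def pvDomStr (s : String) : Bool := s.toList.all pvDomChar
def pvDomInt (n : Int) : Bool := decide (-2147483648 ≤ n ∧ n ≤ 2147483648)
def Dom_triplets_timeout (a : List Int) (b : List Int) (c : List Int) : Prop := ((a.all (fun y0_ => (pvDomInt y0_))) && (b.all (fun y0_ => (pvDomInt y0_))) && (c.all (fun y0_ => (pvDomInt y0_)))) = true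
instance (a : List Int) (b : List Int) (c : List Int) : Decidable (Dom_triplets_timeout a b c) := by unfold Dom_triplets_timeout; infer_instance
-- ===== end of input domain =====

-- B replaces A's per-b linear scans of the descending unique lists by one two-pointer
-- merge over the ascending unique lists (objective: faster).

-- ===== PORT A =====
-- 'for idx, m in enumerate(ys): if m <= n: return idx' (the enumerate/break search)
def pvFindIdxLe (ys : List Int) (n : Int) (k : Nat) : Option Nat :=
  match ys with
  | [] => none
  | m :: t => if m ≤ n then some k else pvFindIdxLe t n (k + 1)

def triplets_timeout (a : List Int) (b : List Int) (c : List Int) : Int :=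
  let a1 := (PySem.List.sorted (PySem.Set.ofList a) (fun x => x) false).reverse
  let b1 := (PySem.List.sorted (PySem.Set.ofList b) (fun x => x) false).reverse
  let c1 := (PySem.List.sorted (PySem.Set.ofList c) (fun x => x) false).reverse
  let possibles := b1.foldl (fun acc n =>
    let midx := pvFindIdxLe a1 n 0
    let lidx := pvFindIdxLe c1 n 0
    match midx, lidx with
    | some midx, some lidx =>
        acc ++ [((a1.length : Int) - (midx : Int)) * ((c1.length : Int) - (lidx : Int))]
    | _, _ => acc) ([] : List Int)
  possibles.sum

-- ===== PORT B =====
-- 'while i < len(xs) and xs[i] <= n: i += 1'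
def pvAdvance (xs : List Int) (n : Int) (i : Nat) : Nat :=
  if h : i < xs.length then
    if xs[i] ≤ n then pvAdvance xs n (i + 1) else i
  else i
termination_by xs.length - i

def triplets_timeout_alt (a : List Int) (b : List Int) (c : List Int) : Int :=
  let ua := PySem.List.sorted (PySem.Set.ofList a) (fun x => x) false
  let uc := PySem.List.sorted (PySem.Set.ofList c) (fun x => x) false
  let ub := PySem.List.sorted (PySem.Set.ofList b) (fun x => x) false
  let st := ub.foldl (fun (st : Nat × Nat × Int) n =>
      let i := pvAdvance ua n st.1
      let j := pvAdvance uc n st.2.1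
      (i, j, st.2.2 + (i : Int) * (j : Int))) ((0, 0, 0) : Nat × Nat × Int)
  st.2.2

-- ===== PRECONDITION & SPEC =====
def Spec_triplets_timeout (a : List Int) (b : List Int) (c : List Int) (out : Int) : Prop := out = triplets_timeout_alt a b c
instance (a : List Int) (b : List Int) (c : List Int) (out : Int) : Decidable (Spec_triplets_timeout a b c out) := by unfold Spec_triplets_timeout; infer_instance

-- ===== CLAIM (what is proved, stated in full; the proofs are below) =====
def Claim_equal_triplets_timeout : Prop := ∀ (a : List Int) (b : List Int) (c : List Int), Dom_triplets_timeout a b c → Spec_triplets_timeout a b c (triplets_timeout a b c)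

-- ===== LEMMAS AND PROOFS =====

-- number of (distinct, here) elements ≤ n
def pvCnt (xs : List Int) (n : Int) : Nat := xs.countP (fun x => decide (x ≤ n))

theorem pvCnt_mono (xs : List Int) {m n : Int} (h : m ≤ n) : pvCnt xs m ≤ pvCnt xs n := by
  apply List.countP_mono_left
  intro x _ hx
  simp only [decide_eq_true_eq] at *
  omega

-- A's enumerate/break search on a non-increasing list, characterised by pvCnt
theorem pvFindIdxLe_eq (ys : List Int) (n : Int) (hs : ys.Pairwise (fun p q => q ≤ p)) :
    ∀ k, pvFindIdxLe ys n k =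
      if pvCnt ys n = 0 then none else some (k + ys.length - pvCnt ys n) := by
  induction ys with
  | nil => intro k; simp [pvFindIdxLe, pvCnt]
  | cons m t ih =>
    intro k
    rcases List.pairwise_cons.mp hs with ⟨hm, ht⟩
    by_cases hmn : m ≤ n
    · have hall : ∀ x ∈ t, decide (x ≤ n) = true := by
        intro x hx; simp only [decide_eq_true_eq]; exact le_trans (hm x hx) hmn
      have hcnt : pvCnt (m :: t) n = t.length + 1 := by
        simp [pvCnt, hmn, List.countP_eq_length.mpr hall]
      simp [pvFindIdxLe, hmn, hcnt]
    · have hcnt : pvCnt (m :: t) n = pvCnt t n := by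
        simp [pvCnt, hmn]
      have hle : pvCnt t n ≤ t.length := List.countP_le_length
      simp only [pvFindIdxLe, if_neg hmn, ih ht (k + 1), hcnt]
      by_cases h0 : pvCnt t n = 0
      · simp [h0]
      · simp only [if_neg h0]
        congr 1
        simp only [List.length_cons]
        omega

-- B's while loop on a non-decreasing list lands exactly on pvCnt
theorem pvAdvance_eq (xs : List Int) (n : Int) (hs : xs.Pairwise (· ≤ ·)) :
    ∀ i, i ≤ pvCnt xs n → pvAdvance xs n i = pvCnt xs n := by
  have hpg := List.pairwise_iff_getElem.mp hs
  intro i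
  induction hi : xs.length - i using Nat.strong_induction_on generalizing i with
  | _ fuel ih =>
  intro hle
  rw [pvAdvance]
  by_cases h : i < xs.length
  · simp only [dif_pos h]
    by_cases hx : xs[i] ≤ n
    · rw [if_pos hx]
      have hicnt : i + 1 ≤ pvCnt xs n := by
        have htd : xs = xs.take (i+1) ++ xs.drop (i+1) := (List.take_append_drop _ _).symm
        have hlen : (xs.take (i+1)).length = i + 1 := by
          simp [List.length_take]; omega
        have hallp : ∀ x ∈ xs.take (i+1), decide (x ≤ n) = true := by
          intro x hxm
          rcases List.mem_iff_getElem.mp hxm with ⟨j, hj, hjx⟩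
          have hj' : j < i + 1 := by omega
          have hj'' : j < xs.length := by
            rw [List.length_take] at hj; omega
          have hxj : x = xs[j] := by
            rw [← hjx, List.getElem_take]
          simp only [decide_eq_true_eq]
          rcases Nat.lt_or_ge j i with hji | hji
          · rw [hxj]; exact le_trans (hpg j i hj'' h hji) hx
          · have : j = i := by omega
            subst this; rw [hxj]; exact hx
        have : pvCnt xs n = (xs.take (i+1)).countP (fun x => decide (x ≤ n))
            + (xs.drop (i+1)).countP (fun x => decide (x ≤ n)) := by
          conv_lhs => rw [pvCnt, htd]
          rw [List.countP_append]
        rw [this, List.countP_eq_length.mpr hallp, hlen]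
        omega
      have := ih (xs.length - (i+1)) (by omega) (i+1) rfl hicnt
      exact this
    · rw [if_neg hx]
      -- all elements from index i on exceed n, so pvCnt ≤ i
      have hcle : pvCnt xs n ≤ i := by
        have htd : xs = xs.take i ++ xs.drop i := (List.take_append_drop _ _).symm
        have hzero : (xs.drop i).countP (fun x => decide (x ≤ n)) = 0 := by
          apply List.countP_eq_zero.mpr
          intro x hxm
          rcases List.mem_iff_getElem.mp hxm with ⟨j, hj, hjx⟩
          rw [List.length_drop] at hj
          have hij : i + j < xs.length := by omega
          have hxj : x = xs[i + j] := by rw [← hjx, List.getElem_drop]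
          simp only [decide_eq_true_eq]
          rcases Nat.eq_zero_or_pos j with hj0 | hjp
          · subst hj0; simp only [Nat.add_zero] at hxj; rw [hxj]; exact hx
          · have hlt : xs[i] ≤ xs[i + j] := hpg i (i + j) h hij (by omega)
            rw [hxj]; intro hcon; exact hx (le_trans hlt hcon)
        have : pvCnt xs n ≤ (xs.take i).length := by
          conv_lhs => rw [pvCnt, htd]
          rw [List.countP_append, hzero, Nat.add_zero]
          exact List.countP_le_length
        rw [List.length_take] at this
        omega
      omega
  · simp only [dif_neg h]
    have : pvCnt xs n ≤ xs.length := List.countP_le_length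
    omega

-- per-element contribution of A: what one iteration of the b-loop appends
def pvGa (ua uc : List Int) (n : Int) : List Int :=
  match pvFindIdxLe ua.reverse n 0, pvFindIdxLe uc.reverse n 0 with
  | some midx, some lidx =>
      [((ua.reverse.length : Int) - (midx : Int)) * ((uc.reverse.length : Int) - (lidx : Int))]
  | _, _ => []

theorem pvGa_sum (ua uc : List Int) (n : Int)
    (ha : ua.Pairwise (· < ·)) (hc : uc.Pairwise (· < ·)) :
    (pvGa ua uc n).sum = (pvCnt ua n : Int) * (pvCnt uc n : Int) := by
  have hra : ua.reverse.Pairwise (fun p q => q ≤ p) :=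
    List.pairwise_reverse.mpr (ha.imp (fun h => le_of_lt h))
  have hrc : uc.reverse.Pairwise (fun p q => q ≤ p) :=
    List.pairwise_reverse.mpr (hc.imp (fun h => le_of_lt h))
  have hca : pvCnt ua.reverse n = pvCnt ua n := by simp [pvCnt]
  have hcc : pvCnt uc.reverse n = pvCnt uc n := by simp [pvCnt]
  have hfa := pvFindIdxLe_eq ua.reverse n hra 0
  have hfc := pvFindIdxLe_eq uc.reverse n hrc 0
  have hlea : pvCnt ua n ≤ ua.length := List.countP_le_length
  have hlec : pvCnt uc n ≤ uc.length := List.countP_le_length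
  rw [hca] at hfa; rw [hcc] at hfc
  by_cases h0a : pvCnt ua n = 0
  · rw [if_pos h0a] at hfa
    simp [pvGa, hfa, h0a]
  · by_cases h0c : pvCnt uc n = 0
    · rw [if_neg h0a] at hfa; rw [if_pos h0c] at hfc
      simp [pvGa, hfa, hfc, h0c]
    · rw [if_neg h0a] at hfa; rw [if_neg h0c] at hfc
      simp only [pvGa, hfa, hfc, List.sum_cons, List.sum_nil, add_zero,
        List.length_reverse, Nat.zero_add]
      congr 1
      · push_cast [Nat.cast_sub hlea]; ring
      · push_cast [Nat.cast_sub hlec]; ring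

-- A's fold over b1 is the sum of the per-element contributions
theorem pvA_fold (ua uc : List Int) (b1 : List Int) :
    (b1.foldl (fun acc n =>
      let midx := pvFindIdxLe ua.reverse n 0
      let lidx := pvFindIdxLe uc.reverse n 0
      match midx, lidx with
      | some midx, some lidx =>
          acc ++ [((ua.reverse.length : Int) - (midx : Int)) * ((uc.reverse.length : Int) - (lidx : Int))]
      | _, _ => acc) ([] : List Int)) = b1.flatMap (pvGa ua uc) := by
  have hstep : (fun (acc : List Int) n =>
      let midx := pvFindIdxLe ua.reverse n 0
      let lidx := pvFindIdxLe uc.reverse n 0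
      match midx, lidx with
      | some midx, some lidx =>
          acc ++ [((ua.reverse.length : Int) - (midx : Int)) * ((uc.reverse.length : Int) - (lidx : Int))]
      | _, _ => acc) = fun acc n => acc ++ pvGa ua uc n := by
    funext acc n
    simp only [pvGa]
    rcases pvFindIdxLe ua.reverse n 0 with _ | m <;> rcases pvFindIdxLe uc.reverse n 0 with _ | l <;> simp
  rw [hstep, PySem.List.foldl_append_eq_flatMap]
  simp

theorem pvSum_flatMap (l : List Int) (f : Int → List Int) :
    (l.flatMap f).sum = (l.map (fun x => (f x).sum)).sum := by
  induction l with
  | nil => simp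
  | cons x t ih => simp [List.flatMap_cons, ih]

-- B's fold invariant: the running total accumulates pvCnt products
theorem pvB_fold (ua uc : List Int) (hua : ua.Pairwise (· ≤ ·)) (huc : uc.Pairwise (· ≤ ·)) :
    ∀ (ub : List Int), ub.Pairwise (· ≤ ·) →
    ∀ (i j : Nat) (t : Int), (∀ n ∈ ub, i ≤ pvCnt ua n) → (∀ n ∈ ub, j ≤ pvCnt uc n) →
    (ub.foldl (fun (st : Nat × Nat × Int) n =>
      let i := pvAdvance ua n st.1
      let j := pvAdvance uc n st.2.1
      (i, j, st.2.2 + (i : Int) * (j : Int))) (i, j, t)).2.2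
      = t + (ub.map (fun n => (pvCnt ua n : Int) * (pvCnt uc n : Int))).sum := by
  intro ub
  induction ub with
  | nil => intro _ i j t _ _; simp
  | cons n rest ih =>
    intro hp i j t hi hj
    rcases List.pairwise_cons.mp hp with ⟨hn, hrest⟩
    have hin : i ≤ pvCnt ua n := hi n (List.mem_cons_self)
    have hjn : j ≤ pvCnt uc n := hj n (List.mem_cons_self)
    have hadva : pvAdvance ua n i = pvCnt ua n := pvAdvance_eq ua n hua i hin
    have hadvc : pvAdvance uc n j = pvCnt uc n := pvAdvance_eq uc n huc j hjn
    simp only [List.foldl_cons, hadva, hadvc]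
    rw [ih hrest _ _ _
      (fun m hm => le_trans (le_of_eq rfl) (pvCnt_mono ua (hn m hm)))
      (fun m hm => le_trans (le_of_eq rfl) (pvCnt_mono uc (hn m hm)))]
    simp [List.sum_cons]
    ring

-- ===== VERDICT (by name: the statement is the Claim_ definition above) =====
theorem triplets_timeout_spec : Claim_equal_triplets_timeout := by
  intro a b c _hdom
  unfold Spec_triplets_timeout triplets_timeout triplets_timeout_alt
  set ua := PySem.List.sorted (PySem.Set.ofList a) (fun x => x) false with hua
  set ub := PySem.List.sorted (PySem.Set.ofList b) (fun x => x) false with hub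
  set uc := PySem.List.sorted (PySem.Set.ofList c) (fun x => x) false with huc
  have hpa : ua.Pairwise (· < ·) := PySem.List.sorted_ofList_pairwise_lt a
  have hpb : ub.Pairwise (· < ·) := PySem.List.sorted_ofList_pairwise_lt b
  have hpc : uc.Pairwise (· < ·) := PySem.List.sorted_ofList_pairwise_lt c
  have hpa' : ua.Pairwise (· ≤ ·) := hpa.imp (fun h => le_of_lt h)
  have hpb' : ub.Pairwise (· ≤ ·) := hpb.imp (fun h => le_of_lt h)
  have hpc' : uc.Pairwise (· ≤ ·) := hpc.imp (fun h => le_of_lt h)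
  simp only []
  rw [pvA_fold ua uc ub.reverse,
      pvB_fold ua uc hpa' hpc' ub hpb' 0 0 0 (fun _ _ => Nat.zero_le _) (fun _ _ => Nat.zero_le _)]
  rw [pvSum_flatMap]
  rw [List.map_reverse, List.sum_reverse, Int.zero_add]
  apply congrArg
  apply List.map_congr_left
  intro n _
  exact pvGa_sum ua uc n hpa hpc
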